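-- pv_equiv track=rewrite | github.com/Azmyue/downsub-youtube-subtitle-downloader | get_youtube_subtitle.py | pick_subtitle
-- ===== SOURCE A (Python) =====
-- def pick_subtitle(data: dict, lang: str | None) -> dict | None:
--     subs = data.get("subtitles") or []
--     trans = data.get("subtitlesAutoTrans") or []
--
--     def find_in(pool):
--         for x in pool:
--             if not isinstance(x, dict):
--                 continue
--             if lang and (x.get("code") == lang or x.get("name") == lang):
--                 return x
--         return None
--
--     if lang:
--         hit = find_in(subs) or find_in(trans)
--         if hit:
--             return hit
--
--     if subs:
--         return subs[0]
--     if trans: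
--         return trans[0]
--     return None
-- ===== SOURCE B (Python) =====
-- def pick_subtitle(data: dict, lang: str | None) -> dict | None:
--     subs = data.get("subtitles") or []
--     trans = data.get("subtitlesAutoTrans") or []
--     best = None  # (rank, item): rank 0 = language match, 1 = mere presence
--     for x in reversed(subs + trans):
--         rank = 0 if (lang and isinstance(x, dict)
--                      and lang in (x.get("code"), x.get("name"))) else 1
--         if best is None or rank <= best[0]:
--             best = (rank, x)
--     return None if best is None else best[1]
-- ===== Notes on version B (the rewrite author's own statement) =====
-- stated objective: alternative
-- what changed: Replaces A's helper with two forward scans and an early-return chain by a back-to-front fold over the chained pools that keeps the best-ranked candidate (rank 0 = language match, rank 1 = presence), earlier elements overwriting ties, with one final unwrap.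
import Mathlib
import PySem

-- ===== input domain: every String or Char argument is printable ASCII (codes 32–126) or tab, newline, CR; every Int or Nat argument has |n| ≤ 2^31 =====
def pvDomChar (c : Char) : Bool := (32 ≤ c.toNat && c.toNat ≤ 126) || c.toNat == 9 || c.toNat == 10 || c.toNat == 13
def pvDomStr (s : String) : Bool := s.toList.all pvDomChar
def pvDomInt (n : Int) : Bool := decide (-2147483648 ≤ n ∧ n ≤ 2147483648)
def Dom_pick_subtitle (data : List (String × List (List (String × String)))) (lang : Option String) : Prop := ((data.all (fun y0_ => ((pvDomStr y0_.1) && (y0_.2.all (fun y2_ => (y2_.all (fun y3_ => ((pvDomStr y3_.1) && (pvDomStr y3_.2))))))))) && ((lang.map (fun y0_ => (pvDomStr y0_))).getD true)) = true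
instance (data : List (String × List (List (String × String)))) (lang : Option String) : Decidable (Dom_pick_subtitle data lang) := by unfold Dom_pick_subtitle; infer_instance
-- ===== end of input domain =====

-- B replaces A's helper with two forward scans and an early-return chain by a single
-- back-to-front fold keeping the best-ranked candidate (objective: alternative).

-- shared: Python truthiness of the `lang` argument (None and "" are falsy)
def langTruthy : Option String → Bool
  | none => false
  | some s => s != ""

-- ===== PORT A =====
-- A's local helper find_in(pool); the isinstance(x, dict) check is vacuous under the
-- type convention (every element is a dict) and so has no branch here.
def findIn (lang : Option String) : List (List (String × String)) → Option (List (String × String))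
  | [] => none
  | x :: rest =>
    if langTruthy lang && (PySem.Dict.get? (PySem.Dict.mk x) "code" == lang || PySem.Dict.get? (PySem.Dict.mk x) "name" == lang)
    then some x else findIn lang rest

def pick_subtitle (data : List (String × List (List (String × String)))) (lang : Option String) : Option (List (String × String)) :=
  let subs := (PySem.Dict.get? (PySem.Dict.mk data) "subtitles").getD []      -- data.get("subtitles") or []
  let trans := (PySem.Dict.get? (PySem.Dict.mk data) "subtitlesAutoTrans").getD []
  -- the trailing if subs / if trans / return None chain
  let fallback : Option (List (String × String)) :=
    match subs with
    | s :: _ => some s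
    | [] => match trans with
            | t :: _ => some t
            | [] => none
  if langTruthy lang then
    -- hit = find_in(subs) or find_in(trans)   (Python `or`: an empty-dict hit is falsy)
    let hit := match findIn lang subs with
      | some h => if h == [] then findIn lang trans else some h
      | none => findIn lang trans
    -- if hit: return hit
    match hit with
    | some h => if h == [] then fallback else some h
    | none => fallback
  else fallback

-- ===== PORT B =====
-- B's loop body: rank 0 for a language match, 1 otherwise; iterating back-to-front,
-- a candidate overwrites `best` when its rank is ≤ best's rank (so the earliest
-- best-ranked element ends up in `best`).
def rankOf (lang : Option String) (x : List (String × String)) : Nat :=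
  if langTruthy lang && (PySem.Dict.get? (PySem.Dict.mk x) "code" == lang || PySem.Dict.get? (PySem.Dict.mk x) "name" == lang)
  then 0 else 1

def stepB (lang : Option String)
    (best : Option (Nat × List (String × String))) (x : List (String × String)) :
    Option (Nat × List (String × String)) :=
  let r := rankOf lang x
  match best with
  | none => some (r, x)
  | some b => if r ≤ b.1 then some (r, x) else some b

def pick_subtitle_alt (data : List (String × List (List (String × String)))) (lang : Option String) : Option (List (String × String)) :=
  let subs := (PySem.Dict.get? (PySem.Dict.mk data) "subtitles").getD []
  let trans := (PySem.Dict.get? (PySem.Dict.mk data) "subtitlesAutoTrans").getD []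
  match ((subs ++ trans).reverse).foldl (stepB lang) none with
  | none => none
  | some b => some b.2

-- ===== PRECONDITION & SPEC =====
def Spec_pick_subtitle (data : List (String × List (List (String × String)))) (lang : Option String) (out : Option (List (String × String))) : Prop := out = pick_subtitle_alt data lang
instance (data : List (String × List (List (String × String)))) (lang : Option String) (out : Option (List (String × String))) : Decidable (Spec_pick_subtitle data lang out) := by unfold Spec_pick_subtitle; infer_instance

-- ===== CLAIM (what is proved, stated in full; the proofs are below) =====
def Claim_equal_pick_subtitle : Prop := ∀ (data : List (String × List (List (String × String)))) (lang : Option String), Dom_pick_subtitle data lang → Spec_pick_subtitle data lang (pick_subtitle data lang)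

-- ===== LEMMAS AND PROOFS =====

-- the match predicate both programs test
def pMatch (lang : Option String) (x : List (String × String)) : Bool :=
  langTruthy lang && (PySem.Dict.get? (PySem.Dict.mk x) "code" == lang || PySem.Dict.get? (PySem.Dict.mk x) "name" == lang)

lemma rankOf_eq (lang : Option String) (x : List (String × String)) :
    rankOf lang x = if pMatch lang x then 0 else 1 := rfl

lemma findIn_eq_find? (lang : Option String) (pool : List (List (String × String))) :
    findIn lang pool = pool.find? (pMatch lang) := by
  induction pool with
  | nil => rfl
  | cons x rest ih =>
    have hstep : findIn lang (x :: rest) = if pMatch lang x then some x else findIn lang rest := rfl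
    rw [hstep, List.find?_cons, ih]
    cases h : pMatch lang x <;> simp

lemma pMatch_ne_nil (lang : Option String) (x : List (String × String))
    (h : pMatch lang x = true) : (x == ([] : List (String × String))) = false := by
  cases x with
  | cons a b => simp
  | nil =>
    cases lang with
    | none => simp [pMatch, langTruthy] at h
    | some s => simp [pMatch, langTruthy, PySem.Dict.get?] at h

lemma pMatch_false_of_not_truthy (lang : Option String) (ht : langTruthy lang = false)
    (x : List (String × String)) : pMatch lang x = false := by
  simp [pMatch, ht]

-- the canonical value B's fold computes on a list
def canon (lang : Option String) (l : List (List (String × String))) :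
    Option (Nat × List (String × String)) :=
  match l.find? (pMatch lang) with
  | some m => some (0, m)
  | none => l.head?.map (fun h => (1, h))

lemma foldl_reverse_stepB (lang : Option String) (l : List (List (String × String))) :
    (l.reverse).foldl (stepB lang) none = canon lang l := by
  rw [List.foldl_reverse]
  induction l with
  | nil => rfl
  | cons x xs ih =>
    rw [List.foldr_cons, ih]
    by_cases h : pMatch lang x = true
    · simp [canon, stepB, rankOf_eq, h]
      cases hf : xs.find? (pMatch lang) <;> cases hh : xs.head? <;> simp
    · have h' : pMatch lang x = false := by simpa using h
      simp only [canon, List.find?_cons, h', List.head?_cons]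
      cases hf : xs.find? (pMatch lang) with
      | some m => cases hh : xs.head? <;> simp [stepB, rankOf_eq, h']
      | none => cases hh : xs.head? <;> simp [stepB, rankOf_eq, h']

lemma alt_eq (data : List (String × List (List (String × String)))) (lang : Option String) :
    pick_subtitle_alt data lang =
      (let subs := (PySem.Dict.get? (PySem.Dict.mk data) "subtitles").getD []
       let trans := (PySem.Dict.get? (PySem.Dict.mk data) "subtitlesAutoTrans").getD []
       match (subs ++ trans).find? (pMatch lang) with
       | some m => some m
       | none => (subs ++ trans).head?) := by
  simp only [pick_subtitle_alt, foldl_reverse_stepB, canon]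
  cases hf : ((PySem.Dict.get? (PySem.Dict.mk data) "subtitles").getD [] ++ (PySem.Dict.get? (PySem.Dict.mk data) "subtitlesAutoTrans").getD []).find? (pMatch lang) <;>
    cases hh : ((PySem.Dict.get? (PySem.Dict.mk data) "subtitles").getD [] ++ (PySem.Dict.get? (PySem.Dict.mk data) "subtitlesAutoTrans").getD []).head? <;>
    simp_all

-- ===== VERDICT (by name: the statement is the Claim_ definition above) =====
theorem pick_subtitle_spec : Claim_equal_pick_subtitle := by
  intro data lang _
  unfold Spec_pick_subtitle
  rw [alt_eq]
  simp only [pick_subtitle, findIn_eq_find?]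
  set subs := (PySem.Dict.get? (PySem.Dict.mk data) "subtitles").getD [] with hsubs
  set trans := (PySem.Dict.get? (PySem.Dict.mk data) "subtitlesAutoTrans").getD [] with htrans
  by_cases ht : langTruthy lang = true
  · simp only [ht, if_true]
    rw [List.find?_append]
    cases hs : subs.find? (pMatch lang) with
    | some h =>
      have hm := List.find?_some hs
      have := pMatch_ne_nil lang h hm
      simp [this]
    | none =>
      cases ht2 : trans.find? (pMatch lang) with
      | some h =>
        have hm := List.find?_some ht2
        have := pMatch_ne_nil lang h hm
        simp [this]
      | none =>
        cases subs <;> cases trans <;> simp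
  · have ht' : langTruthy lang = false := by simpa using ht
    have : (subs ++ trans).find? (pMatch lang) = none := by
      apply List.find?_eq_none.mpr
      intro x _
      simp [pMatch_false_of_not_truthy lang ht']
    simp only [ht', Bool.false_eq_true, if_false, this]
    cases subs <;> cases trans <;> simp
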